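-- pv_equiv track=rewrite | github.com/pniyongabo/AdventOfCode | 2025/day-2/sln-part-2.py | find_repeated_digit_sequences
-- ===== SOURCE A (Python) =====
-- def find_repeated_digit_sequences(start, end):
--     """
--     Find numbers with some sequence of digits repeated twice consecutively.
--     For example: 11 (1 repeated), 1212 (12 repeated), 123123 (123 repeated)
--     """
--     result = []
--
--     for num in range(start, end + 1):
--         s = str(num)
--         length = len(s)
--
--         # Try all possible substring lengths (from 1 to half the string length)
--         for sub_len in range(1, length // 2 + 1):
--             if length % sub_len == 0 and length // sub_len == 2:
--                 # Check if first half equals second half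
--                 if s[:sub_len] == s[sub_len:sub_len * 2]:
--                     result.append(num)
--                     break
--
--     return result
-- ===== SOURCE B (Python) =====
-- def find_repeated_digit_sequences(start, end):
--     # Enumerate candidates h*(10**L + 1) directly instead of scanning the range.
--     result = []
--     if end < 11:
--         return result
--     max_L = len(str(end)) // 2
--     for L in range(1, max_L + 1):
--         mul = 10 ** L + 1
--         lo = max(10 ** (L - 1), -(-start // mul))
--         hi = min(10 ** L - 1, end // mul)
--         for h in range(lo, hi + 1):
--             result.append(h * mul)
--     return result
-- ===== Notes on version B (the rewrite author's own statement) =====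
-- stated objective: faster
-- what changed: Instead of testing every number in [start, end] by splitting its decimal string, B directly enumerates the repeated-digit numbers h*(10^L+1) for each half-length L and each half-value h in range, so the work is proportional to the output size, not to end-start; intended as asymptotically faster (a timing run measured a 48x median at the largest size, though not consistent across all sampled inputs).
import Mathlib
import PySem

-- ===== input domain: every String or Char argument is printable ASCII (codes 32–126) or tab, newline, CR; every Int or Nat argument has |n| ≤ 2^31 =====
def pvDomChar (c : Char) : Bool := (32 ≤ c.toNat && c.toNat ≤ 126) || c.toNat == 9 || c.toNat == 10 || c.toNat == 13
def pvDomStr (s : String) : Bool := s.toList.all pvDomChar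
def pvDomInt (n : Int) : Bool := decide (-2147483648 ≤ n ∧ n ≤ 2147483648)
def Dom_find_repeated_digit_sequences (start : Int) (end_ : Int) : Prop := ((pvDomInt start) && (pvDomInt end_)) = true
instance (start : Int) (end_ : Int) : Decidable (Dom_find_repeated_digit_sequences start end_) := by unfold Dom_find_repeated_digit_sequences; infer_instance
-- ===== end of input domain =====

-- B enumerates the candidates h*(10^L+1) directly instead of scanning the whole range
-- (intended as faster; a timing run measured a 48x median at the largest size, not consistent on all inputs).

-- ===== PORT A =====
-- the inner 'for sub_len in range(…): if …: result.append(num); break' appends num at most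
-- once, exactly when some sub_len satisfies the condition: rendered as List.any (exact).
def pvACheck (s : List Char) : Bool :=
  (PySem.List.pyRange 1 (PySem.Int.floordiv (s.length : Int) 2 + 1) 1).any (fun sub_len =>
    decide (PySem.Int.mod (s.length : Int) sub_len = 0) &&
    decide (PySem.Int.floordiv (s.length : Int) sub_len = 2) &&
    decide (PySem.List.slice s none (some sub_len) =
            PySem.List.slice s (some sub_len) (some (sub_len * 2))))

def find_repeated_digit_sequences (start : Int) (end_ : Int) : List Int :=
  (PySem.List.pyRange start (end_ + 1) 1).foldl
    (fun result num =>
      if pvACheck (PySem.Int.toChars num) then result ++ [num] else result) []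

-- ===== PORT B =====
-- 10 ** L is ported as (10:Int) ^ L.toNat (exact: every iterated L is ≥ 1);
-- len(str(end)) is ported through PySem.Int.toChars (= the characters of str(end), exact).
def find_repeated_digit_sequences_alt (start : Int) (end_ : Int) : List Int :=
  if end_ < 11 then []
  else
    let max_L := PySem.Int.floordiv ((PySem.Int.toChars end_).length : Int) 2
    (PySem.List.pyRange 1 (max_L + 1) 1).foldl
      (fun result L =>
        let mul : Int := 10 ^ L.toNat + 1
        let lo : Int := max (10 ^ (L - 1).toNat) (-(PySem.Int.floordiv (-start) mul))
        let hi : Int := min (10 ^ L.toNat - 1) (PySem.Int.floordiv end_ mul)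
        result ++ (PySem.List.pyRange lo (hi + 1) 1).map (fun h => h * mul)) []

-- ===== PRECONDITION & SPEC =====
def Spec_find_repeated_digit_sequences (start : Int) (end_ : Int) (out : List Int) : Prop := out = find_repeated_digit_sequences_alt start end_
instance (start : Int) (end_ : Int) (out : List Int) : Decidable (Spec_find_repeated_digit_sequences start end_ out) := by unfold Spec_find_repeated_digit_sequences; infer_instance

-- ===== CLAIM (what is proved, stated in full; the proofs are below) =====
def Claim_equal_find_repeated_digit_sequences : Prop := ∀ (start : Int) (end_ : Int), Dom_find_repeated_digit_sequences start end_ → Spec_find_repeated_digit_sequences start end_ (find_repeated_digit_sequences start end_)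

-- ===== LEMMAS AND PROOFS =====

-- the numbers both programs collect: some digit string repeated twice
def RepNum (n : Int) : Prop :=
  ∃ k h : ℕ, 0 < k ∧ 10 ^ (k - 1) ≤ h ∧ h < 10 ^ k ∧ n = (h : Int) * ((10 : Int) ^ k + 1)

-- ---- bridge: Nat.toDigits 10 is the reversed digitChar image of Nat.digits 10 ----

lemma toDigitsCore_eq : ∀ (f n : ℕ) (acc : List Char), 0 < n → n ≤ f →
    Nat.toDigitsCore 10 f n acc = ((Nat.digits 10 n).map Nat.digitChar).reverse ++ acc := by
  intro f
  induction f with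
  | zero => intro n acc h1 h2; omega
  | succ f ih =>
    intro n acc h1 h2
    simp only [Nat.toDigitsCore]
    by_cases h : n / 10 = 0
    · rw [if_pos h]
      have hlt : n < 10 := by omega
      rw [Nat.digits_def' (by norm_num : 1 < 10) h1, h, Nat.digits_zero]
      have hmod : n % 10 = n := Nat.mod_eq_of_lt hlt
      simp [hmod]
    · rw [if_neg h]
      have hpos : 0 < n / 10 := Nat.pos_of_ne_zero h
      have hlt : n / 10 < n := Nat.div_lt_self h1 (by norm_num)
      rw [ih (n / 10) _ hpos (by omega), Nat.digits_def' (by norm_num : 1 < 10) h1]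
      simp

lemma toDigits_eq (n : ℕ) (hn : 0 < n) :
    Nat.toDigits 10 n = ((Nat.digits 10 n).map Nat.digitChar).reverse := by
  show Nat.toDigitsCore 10 (n + 1) n [] = _
  rw [toDigitsCore_eq (n + 1) n [] hn (by omega)]
  simp

lemma digitChar_inj {a b : ℕ} (ha : a < 10) (hb : b < 10)
    (h : Nat.digitChar a = Nat.digitChar b) : a = b := by
  interval_cases a <;> interval_cases b <;>
    first | rfl | exact absurd h (by decide)

lemma map_digitChar_inj : ∀ {l1 l2 : List ℕ}, (∀ x ∈ l1, x < 10) → (∀ x ∈ l2, x < 10) →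
    l1.map Nat.digitChar = l2.map Nat.digitChar → l1 = l2 := by
  intro l1
  induction l1 with
  | nil => intro l2 _ _ h; cases l2 <;> simp_all
  | cons x t ih =>
    intro l2 h1 h2 h
    cases l2 with
    | nil => simp_all
    | cons y t2 =>
      simp only [List.map_cons, List.cons.injEq] at h
      have hx := digitChar_inj (h1 x (by simp)) (h2 y (by simp)) h.1
      rw [hx, ih (fun z hz => h1 z (by simp [hz])) (fun z hz => h2 z (by simp [hz])) h.2]

lemma ne_dash_of_mem_toDigits {m : ℕ} {c : Char} (hc : c ∈ Nat.toDigits 10 m) : c ≠ '-' := by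
  rcases Nat.eq_zero_or_pos m with rfl | hm
  · have h0 : Nat.toDigits 10 0 = ['0'] := rfl
    rw [h0] at hc
    simp at hc
    simp [hc]
  · rw [toDigits_eq m hm] at hc
    simp only [List.mem_reverse, List.mem_map] at hc
    obtain ⟨d, hd, rfl⟩ := hc
    have hd10 : d < 10 := Nat.digits_lt_base (by norm_num) hd
    interval_cases d <;> decide

-- ---- A's per-number check, characterised ----

lemma aCheck_iff (s : List Char) :
    pvACheck s = true ↔ ∃ k : ℕ, 0 < k ∧ s.length = 2 * k ∧ s.take k = s.drop k := by
  unfold pvACheck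
  rw [List.any_eq_true]
  constructor
  · rintro ⟨j, hjmem, hcond⟩
    rw [PySem.List.mem_pyRange_one] at hjmem
    obtain ⟨hj1, hj2⟩ := hjmem
    simp only [Bool.and_eq_true, decide_eq_true_eq] at hcond
    obtain ⟨⟨hmod, hdiv⟩, hslice⟩ := hcond
    have hfm := PySem.Int.floordiv_mul_add_mod (s.length : Int) j
    rw [hmod, hdiv] at hfm
    have hlen : (s.length : Int) = 2 * j := by omega
    refine ⟨j.toNat, by omega, by omega, ?_⟩
    have hj0 : (0:Int) ≤ j := by omega
    rw [PySem.List.slice_to s hj0, PySem.List.slice_toNat s hj0 (by omega)] at hslice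
    have h1 : (j * 2).toNat - j.toNat = j.toNat := by omega
    have hdl : (List.drop j.toNat s).length ≤ j.toNat := by
      rw [List.length_drop]; omega
    rw [h1, List.take_of_length_le hdl] at hslice
    exact hslice
  · rintro ⟨k, hk, hlen, heq⟩
    refine ⟨(k : Int), ?_, ?_⟩
    · rw [PySem.List.mem_pyRange_one]
      refine ⟨by exact_mod_cast hk, ?_⟩
      have hfd : PySem.Int.floordiv (s.length : Int) 2 = k := by
        rw [PySem.Int.floordiv_eq_iff_of_pos (by norm_num : (0:Int) < 2)]
        constructor <;> · push_cast [hlen]; omega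
      omega
    · simp only [Bool.and_eq_true, decide_eq_true_eq]
      have hk0 : (0:Int) < (k:Int) := by exact_mod_cast hk
      refine ⟨⟨?_, ?_⟩, ?_⟩
      · rw [PySem.Int.mod_eq_zero_iff_dvd]
        exact ⟨2, by push_cast [hlen]; ring⟩
      · rw [PySem.Int.floordiv_eq_iff_of_pos hk0]
        constructor <;> · push_cast [hlen]; omega
      · rw [PySem.List.slice_to s (le_of_lt hk0),
           PySem.List.slice_toNat s (le_of_lt hk0) (by positivity)]
        have h1 : ((k:Int) * 2).toNat - (k:Int).toNat = k := by omega
        rw [h1]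
        have h2 : (k:Int).toNat = k := by omega
        have hdl : (List.drop k s).length ≤ k := by
          rw [List.length_drop]; omega
        rw [h2, List.take_of_length_le hdl]
        exact heq

lemma digits_split_iff (m : ℕ) (hm : 0 < m) :
    (∃ k : ℕ, 0 < k ∧ (Nat.digits 10 m).length = 2 * k ∧
        (Nat.digits 10 m).take k = (Nat.digits 10 m).drop k) ↔
    (∃ k h : ℕ, 0 < k ∧ 10 ^ (k - 1) ≤ h ∧ h < 10 ^ k ∧ m = h * (10 ^ k + 1)) := by
  constructor
  · rintro ⟨k, hk, hlen, heq⟩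
    set d := Nat.digits 10 m with hd
    set e := d.drop k with he
    have hlene : e.length = k := by rw [he, List.length_drop, hlen]; omega
    have hdecomp : d = e ++ e := by
      conv_lhs => rw [← List.take_append_drop k d]
      rw [heq]
    have hem : m = Nat.ofDigits 10 d := (Nat.ofDigits_digits 10 m).symm
    set h := Nat.ofDigits 10 e with hh
    have hne : e ≠ [] := by
      intro h0; rw [h0] at hlene; simp at hlene; omega
    have hdig : Nat.digits 10 h = e := by
      apply Nat.digits_ofDigits 10 (by norm_num)
      · intro l hl
        exact Nat.digits_lt_base (by norm_num) (List.mem_of_mem_drop (he ▸ hl))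
      · intro h0
        rw [List.getLast_drop h0]
        exact Nat.getLast_digit_ne_zero 10 (by omega)
    have hlenk : (Nat.digits 10 h).length = k := by rw [hdig, hlene]
    refine ⟨k, h, hk, ?_, ?_, ?_⟩
    · by_contra hlt
      rw [not_le] at hlt
      have := (Nat.digits_length_le_iff (by norm_num : 1 < 10) h).mpr hlt
      omega
    · exact (Nat.digits_length_le_iff (by norm_num : 1 < 10) h).mp (le_of_eq hlenk)
    · rw [hem, hdecomp, Nat.ofDigits_append, hlene, ← hh]
      ring
  · rintro ⟨k, h, hk, hlo, hhi, rfl⟩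
    have hp : 0 < (10:ℕ) ^ (k - 1) := pow_pos (by norm_num) _
    have hlenh : (Nat.digits 10 h).length = k := by
      have h1 : (Nat.digits 10 h).length ≤ k :=
        (Nat.digits_length_le_iff (by norm_num : 1 < 10) h).mpr hhi
      have h2 : k - 1 < (Nat.digits 10 h).length :=
        (Nat.lt_digits_length_iff (by norm_num : 1 < 10) h).mpr hlo
      omega
    have hdd : Nat.digits 10 h ++ Nat.digits 10 h = Nat.digits 10 (h * (10 ^ k + 1)) := by
      rw [Nat.digits_append_digits (by norm_num : 0 < 10), hlenh]
      congr 1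
      ring
    have hlh : (Nat.digits 10 h).length = k := hlenh
    refine ⟨k, hk, ?_, ?_⟩
    · rw [← hdd, List.length_append, hlh]; omega
    · rw [← hdd, List.take_left' hlh, List.drop_left' hlh]

lemma RepNum.eleven_le {n : Int} (h : RepNum n) : 11 ≤ n := by
  obtain ⟨k, h, hk, hlo, hhi, rfl⟩ := h
  have h1 : 1 ≤ h := le_trans (Nat.one_le_pow _ _ (by norm_num)) hlo
  have h2 : (10:Int) ^ 1 ≤ (10:Int) ^ k := pow_le_pow_right₀ (by norm_num) hk
  have h3 : (1:Int) ≤ (h:Int) := by exact_mod_cast h1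
  rw [pow_one] at h2
  have h4 := mul_le_mul_of_nonneg_right h3
    (show (0:Int) ≤ (10:Int) ^ k + 1 by positivity)
  rw [one_mul] at h4
  linarith

lemma check_toChars_iff (n : Int) : pvACheck (PySem.Int.toChars n) = true ↔ RepNum n := by
  by_cases hneg : n < 0
  · constructor
    · intro hchk
      exfalso
      rw [aCheck_iff] at hchk
      obtain ⟨k, hk, hlen, heq⟩ := hchk
      have hs : PySem.Int.toChars n = '-' :: Nat.toDigits 10 n.natAbs := by
        simp [PySem.Int.toChars, hneg]
      rw [hs] at hlen heq
      have hk1 : ('-' :: Nat.toDigits 10 n.natAbs).take k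
          = '-' :: (Nat.toDigits 10 n.natAbs).take (k - 1) := by
        cases k with
        | zero => omega
        | succ k' => simp
      rw [hk1] at heq
      have hmem : '-' ∈ ('-' :: Nat.toDigits 10 n.natAbs).drop k := by
        rw [← heq]; simp
      have hmem2 : '-' ∈ Nat.toDigits 10 n.natAbs := by
        cases k with
        | zero => omega
        | succ k' =>
          rw [List.drop_succ_cons] at hmem
          exact List.mem_of_mem_drop hmem
      exact ne_dash_of_mem_toDigits hmem2 rfl
    · intro h; exfalso; have := h.eleven_le; omega
  · rw [not_lt] at hneg
    by_cases hz : n = 0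
    · subst hz
      constructor
      · intro h; exact absurd h (by decide)
      · intro h; exfalso; have := h.eleven_le; omega
    · have hpos : 0 < n := by omega
      have hm : 0 < n.toNat := by omega
      have hs : PySem.Int.toChars n = ((Nat.digits 10 n.toNat).map Nat.digitChar).reverse := by
        have : ¬ n < 0 := by omega
        simp only [PySem.Int.toChars, if_neg this]
        exact toDigits_eq _ hm
      rw [aCheck_iff, hs]
      set d := Nat.digits 10 n.toNat with hd
      set md := d.map Nat.digitChar with hmd
      have hlmd : md.length = d.length := by simp [hmd]
      have hbound : ∀ x ∈ d, x < 10 := fun x hx => Nat.digits_lt_base (by norm_num) hx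
      constructor
      · rintro ⟨k, hk, hlen, heq⟩
        rw [List.length_reverse] at hlen
        rw [List.take_reverse, List.drop_reverse] at heq
        have hdlen : d.length = 2 * k := by rw [← hlmd]; exact hlen
        have h2 : md.length - k = k := by rw [hlmd]; omega
        rw [h2] at heq
        have heq2 : md.drop k = md.take k := List.reverse_inj.mp heq
        have heq3 : d.take k = d.drop k := by
          apply map_digitChar_inj
            (fun x hx => hbound x (List.mem_of_mem_take hx))
            (fun x hx => hbound x (List.mem_of_mem_drop hx))
          rw [List.map_take, List.map_drop, ← hmd, heq2]
        obtain ⟨k', h', hk', hlo, hhi, hmeq⟩ :=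
          (digits_split_iff n.toNat hm).mp ⟨k, hk, hdlen, heq3⟩
        refine ⟨k', h', hk', hlo, hhi, ?_⟩
        have : ((h' * (10 ^ k' + 1) : ℕ) : Int) = (h' : Int) * ((10:Int) ^ k' + 1) := by
          push_cast; ring
        omega
      · rintro ⟨k, h, hk, hlo, hhi, hneq⟩
        have hcast : ((h * (10 ^ k + 1) : ℕ) : Int) = (h : Int) * ((10:Int) ^ k + 1) := by
          push_cast; ring
        have hmn : n.toNat = h * (10 ^ k + 1) := by omega
        obtain ⟨k2, hk2, hlen2, heq2⟩ := (digits_split_iff n.toNat hm).mpr ⟨k, h, hk, hlo, hhi, hmn⟩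
        have hml : md.length = 2 * k2 := by rw [hlmd]; exact hlen2
        refine ⟨k2, hk2, by rw [List.length_reverse]; exact hml, ?_⟩
        rw [List.take_reverse, List.drop_reverse]
        have h2 : md.length - k2 = k2 := by omega
        rw [h2]
        congr 1
        rw [← List.map_drop, ← List.map_take, heq2]

-- ---- list-level shapes ----

lemma A_eq_filter (start end_ : Int) :
    find_repeated_digit_sequences start end_ =
      (PySem.List.pyRange start (end_ + 1) 1).filter
        (fun num => pvACheck (PySem.Int.toChars num)) := by
  unfold find_repeated_digit_sequences
  have := PySem.List.foldl_append_if (fun num => pvACheck (PySem.Int.toChars num)) id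
    (PySem.List.pyRange start (end_ + 1) 1) []
  simpa using this

lemma mem_A_iff (start end_ n : Int) :
    n ∈ find_repeated_digit_sequences start end_ ↔ start ≤ n ∧ n ≤ end_ ∧ RepNum n := by
  rw [A_eq_filter, List.mem_filter, PySem.List.mem_pyRange_one, check_toChars_iff]
  constructor
  · rintro ⟨⟨h1, h2⟩, h3⟩; exact ⟨h1, by omega, h3⟩
  · rintro ⟨h1, h2, h3⟩; exact ⟨⟨h1, by omega⟩, h3⟩

lemma pairwise_A (start end_ : Int) :
    (find_repeated_digit_sequences start end_).Pairwise (· < ·) := by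
  rw [A_eq_filter]
  exact (PySem.List.pairwise_lt_pyRange_one _ _).filter _

lemma B_eq_flatMap (start end_ : Int) (h11 : ¬ end_ < 11) :
    find_repeated_digit_sequences_alt start end_ =
      (PySem.List.pyRange 1 (PySem.Int.floordiv ((PySem.Int.toChars end_).length : Int) 2 + 1) 1).flatMap
        (fun L =>
          (PySem.List.pyRange
              (max ((10 : Int) ^ (L - 1).toNat) (-(PySem.Int.floordiv (-start) (10 ^ L.toNat + 1))))
              (min ((10 : Int) ^ L.toNat - 1) (PySem.Int.floordiv end_ (10 ^ L.toNat + 1)) + 1) 1).map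
            (fun h => h * ((10 : Int) ^ L.toNat + 1))) := by
  unfold find_repeated_digit_sequences_alt
  rw [if_neg h11]
  have := PySem.List.foldl_append_eq_flatMap
    (fun L =>
      (PySem.List.pyRange
          (max ((10 : Int) ^ (L - 1).toNat) (-(PySem.Int.floordiv (-start) (10 ^ L.toNat + 1))))
          (min ((10 : Int) ^ L.toNat - 1) (PySem.Int.floordiv end_ (10 ^ L.toNat + 1)) + 1) 1).map
        (fun h => h * ((10 : Int) ^ L.toNat + 1)))
    (PySem.List.pyRange 1 (PySem.Int.floordiv ((PySem.Int.toChars end_).length : Int) 2 + 1) 1) []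
  simpa using this

lemma ceil_le_iff (s mul hh : Int) (hmul : 0 < mul) :
    -(PySem.Int.floordiv (-s) mul) ≤ hh ↔ s ≤ hh * mul := by
  rw [neg_le, PySem.Int.le_floordiv_iff_mul_le hmul, neg_mul, neg_le_neg_iff]

lemma len_toChars_pos (e : Int) (he : 0 < e) :
    (PySem.Int.toChars e).length = (Nat.digits 10 e.toNat).length := by
  have : ¬ e < 0 := by omega
  simp only [PySem.Int.toChars, if_neg this]
  rw [toDigits_eq _ (by omega)]
  simp

lemma mem_B_iff (start end_ n : Int) (h11 : ¬ end_ < 11) :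
    n ∈ find_repeated_digit_sequences_alt start end_ ↔ start ≤ n ∧ n ≤ end_ ∧ RepNum n := by
  rw [B_eq_flatMap start end_ h11, List.mem_flatMap]
  rw [not_lt] at h11
  constructor
  · rintro ⟨L, hL, hmem⟩
    rw [PySem.List.mem_pyRange_one] at hL
    obtain ⟨hL1, hL2⟩ := hL
    rw [List.mem_map] at hmem
    obtain ⟨hh, hhmem, rfl⟩ := hmem
    rw [PySem.List.mem_pyRange_one] at hhmem
    obtain ⟨hlo, hhi⟩ := hhmem
    set k := L.toNat with hk
    have hk1 : 1 ≤ k := by omega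
    have hmul : (0:Int) < 10 ^ k + 1 := by positivity
    have hkm1 : (L - 1).toNat = k - 1 := by omega
    have hlo1 : (10:Int) ^ (k - 1) ≤ hh := by
      have := le_trans (le_max_left _ _) hlo
      rwa [hkm1] at this
    have hlo2 : start ≤ hh * ((10:Int) ^ k + 1) :=
      (ceil_le_iff start _ hh hmul).mp (le_trans (le_max_right _ _) hlo)
    have h5 := min_le_left ((10:Int) ^ k - 1) (PySem.Int.floordiv end_ (10 ^ k + 1))
    have h6 := min_le_right ((10:Int) ^ k - 1) (PySem.Int.floordiv end_ (10 ^ k + 1))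
    have hhi1 : hh ≤ (10:Int) ^ k - 1 := by omega
    have hhi2 : hh * ((10:Int) ^ k + 1) ≤ end_ :=
      (PySem.Int.le_floordiv_iff_mul_le hmul).mp (by omega)
    have hpowc1 : ((10 ^ (k - 1) : ℕ) : Int) = (10:Int) ^ (k - 1) := by push_cast; ring
    have hpowc2 : ((10 ^ k : ℕ) : Int) = (10:Int) ^ k := by push_cast; ring
    have hh0 : (0:Int) ≤ hh := le_trans (by positivity) hlo1
    refine ⟨hlo2, hhi2, k, hh.toNat, hk1, by omega, by omega, ?_⟩
    rw [Int.toNat_of_nonneg hh0]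
  · rintro ⟨hstart, hend, k, h, hk, hlo, hhi, rfl⟩
    have hmul : (0:Int) < 10 ^ k + 1 := by positivity
    have hpowc1 : ((10 ^ (k - 1) : ℕ) : Int) = (10:Int) ^ (k - 1) := by push_cast; ring
    have hpowc2 : ((10 ^ k : ℕ) : Int) = (10:Int) ^ k := by push_cast; ring
    have hlo' : (10:Int) ^ (k - 1) ≤ (h:Int) := by
      have : ((10 ^ (k - 1) : ℕ) : Int) ≤ (h:Int) := by exact_mod_cast hlo
      omega
    have hhi' : (h:Int) < (10:Int) ^ k := by
      have : (h:Int) < ((10 ^ k : ℕ) : Int) := by exact_mod_cast hhi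
      omega
    refine ⟨(k:Int), ?_, ?_⟩
    · rw [PySem.List.mem_pyRange_one]
      refine ⟨by exact_mod_cast hk, ?_⟩
      have hend0 : (0:Int) < end_ := by omega
      rw [len_toChars_pos end_ hend0]
      have hnlb : (10:ℕ) ^ (2 * k - 1) ≤ end_.toNat := by
        have e1 : (10:Int) ^ (2 * k - 1) = (10:Int) ^ (k - 1) * (10:Int) ^ k := by
          rw [← pow_add]; congr 1; omega
        have e2 : (10:Int) ^ (2 * k - 1) ≤ (h:Int) * ((10:Int) ^ k + 1) := by
          have hkpos : (0:Int) < (10:Int) ^ k := by positivity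
          have := mul_le_mul_of_nonneg_right hlo' (le_of_lt hkpos)
          rw [← e1] at this
          nlinarith [pow_pos (by norm_num : (0:Int) < 10) (k - 1)]
        have e3 : ((10 ^ (2 * k - 1) : ℕ) : Int) = (10:Int) ^ (2 * k - 1) := by push_cast; ring
        omega
      have hlen : 2 * k ≤ (Nat.digits 10 end_.toNat).length := by
        have := (Nat.lt_digits_length_iff (by norm_num : 1 < 10) end_.toNat).mpr hnlb
        omega
      have hkle : (k:Int) * 2 ≤ ((Nat.digits 10 end_.toNat).length : Int) := by
        exact_mod_cast (by omega : k * 2 ≤ (Nat.digits 10 end_.toNat).length)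
      have hfd : (k:Int) ≤ PySem.Int.floordiv ((Nat.digits 10 end_.toNat).length : Int) 2 :=
        (PySem.Int.le_floordiv_iff_mul_le (by norm_num : (0:Int) < 2)).mpr hkle
      omega
    · rw [List.mem_map]
      have hkk : ((k:Int)).toNat = k := by omega
      have hkm1 : ((k:Int) - 1).toNat = k - 1 := by omega
      refine ⟨(h:Int), ?_, by rw [hkk]⟩
      rw [PySem.List.mem_pyRange_one, hkk, hkm1]
      refine ⟨max_le hlo' ((ceil_le_iff start _ _ hmul).mpr hstart), ?_⟩
      have h1 : (h:Int) ≤ (10:Int) ^ k - 1 := by omega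
      have h2 : (h:Int) ≤ PySem.Int.floordiv end_ ((10:Int) ^ k + 1) :=
        (PySem.Int.le_floordiv_iff_mul_le hmul).mpr hend
      have := le_min h1 h2
      omega

lemma pairwise_flatMap_of {g : Int → List Int} : ∀ {l : List Int},
    l.Pairwise (· < ·) →
    (∀ L ∈ l, (g L).Pairwise (· < ·)) →
    (∀ L1 ∈ l, ∀ L2 ∈ l, L1 < L2 → ∀ a ∈ g L1, ∀ b ∈ g L2, a < b) →
    (l.flatMap g).Pairwise (· < ·) := by
  intro l
  induction l with
  | nil => simp
  | cons x t ih =>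
    intro hl hg hcross
    rw [List.flatMap_cons, List.pairwise_append]
    have hl' := List.pairwise_cons.mp hl
    refine ⟨hg x (by simp), ih hl'.2 (fun L hL => hg L (by simp [hL]))
      (fun L1 h1 L2 h2 hlt => hcross L1 (by simp [h1]) L2 (by simp [h2]) hlt), ?_⟩
    intro a ha b hb
    rw [List.mem_flatMap] at hb
    obtain ⟨L2, hL2, hb2⟩ := hb
    exact hcross x (by simp) L2 (by simp [hL2]) (hl'.1 L2 hL2) a ha b hb2

lemma pairwise_B (start end_ : Int) :
    (find_repeated_digit_sequences_alt start end_).Pairwise (· < ·) := by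
  by_cases h11 : end_ < 11
  · unfold find_repeated_digit_sequences_alt
    rw [if_pos h11]
    simp
  · rw [B_eq_flatMap start end_ h11]
    apply pairwise_flatMap_of (PySem.List.pairwise_lt_pyRange_one _ _)
    · intro L hL
      rw [List.pairwise_map]
      have hmul : (0:Int) < 10 ^ L.toNat + 1 := by positivity
      exact (PySem.List.pairwise_lt_pyRange_one _ _).imp
        (fun hab => mul_lt_mul_of_pos_right hab hmul)
    · intro L1 hL1 L2 hL2 hlt a ha b hb
      rw [PySem.List.mem_pyRange_one] at hL1 hL2
      rw [List.mem_map] at ha hb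
      obtain ⟨x, hx, rfl⟩ := ha
      obtain ⟨y, hy, rfl⟩ := hb
      rw [PySem.List.mem_pyRange_one] at hx hy
      set k1 := L1.toNat with hk1d
      set k2 := L2.toNat with hk2d
      have hk1 : 1 ≤ k1 := by omega
      have hk12 : k1 < k2 := by omega
      have hx2 : x ≤ (10:Int) ^ k1 - 1 := by
        have := hx.2
        have h5 := min_le_left ((10:Int) ^ k1 - 1) (PySem.Int.floordiv end_ (10 ^ k1 + 1))
        omega
      have hy2 : (10:Int) ^ (k2 - 1) ≤ y := by
        have := le_trans (le_max_left _ _) hy.1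
        have hkm : (L2 - 1).toNat = k2 - 1 := by omega
        rwa [hkm] at this
      -- a = x*(10^k1+1) ≤ 10^(2k1) - 1 < 10^(2k2-1) ≤ y*(10^k2+1) = b
      have ha_ub : x * ((10:Int) ^ k1 + 1) ≤ (10:Int) ^ (2 * k1) + (10:Int) ^ k1 - 1 := by
        have hp : (0:Int) < (10:Int) ^ k1 + 1 := by positivity
        have := mul_le_mul_of_nonneg_right hx2 (le_of_lt hp)
        have e : ((10:Int) ^ k1 - 1) * ((10:Int) ^ k1 + 1) = (10:Int) ^ (2 * k1) - 1 := by
          rw [two_mul, pow_add]; ring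
        omega
      have hb_lb : (10:Int) ^ (2 * k2 - 1) ≤ y * ((10:Int) ^ k2 + 1) := by
        have hp : (0:Int) < (10:Int) ^ k2 := by positivity
        have h6 := mul_le_mul_of_nonneg_right hy2 (le_of_lt hp)
        have e : (10:Int) ^ (k2 - 1) * (10:Int) ^ k2 = (10:Int) ^ (2 * k2 - 1) := by
          rw [← pow_add]; congr 1; omega
        nlinarith [pow_pos (by norm_num : (0:Int) < 10) (k2 - 1)]
      have hmono : (10:Int) ^ (2 * k1 + 1) ≤ (10:Int) ^ (2 * k2 - 1) :=
        pow_le_pow_right₀ (by norm_num) (by omega)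
      have hsplit : (10:Int) ^ (2 * k1 + 1) = (10:Int) ^ (2 * k1) * 10 := by
        rw [pow_succ]
      have hpk1 : (10:Int) ^ k1 ≤ (10:Int) ^ (2 * k1) :=
        pow_le_pow_right₀ (by norm_num) (by omega)
      have hpos : (0:Int) < (10:Int) ^ (2 * k1) := by positivity
      omega

-- ===== VERDICT (by name: the statement is the Claim_ definition above) =====
theorem find_repeated_digit_sequences_spec : Claim_equal_find_repeated_digit_sequences := by
  intro start end_ _
  unfold Spec_find_repeated_digit_sequences
  by_cases h11 : end_ < 11
  · have hB : find_repeated_digit_sequences_alt start end_ = [] := by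
      unfold find_repeated_digit_sequences_alt; simp [h11]
    rw [hB, A_eq_filter, List.filter_eq_nil_iff]
    intro n hn hchk
    have h1 := (check_toChars_iff n).mp hchk
    have h2 := h1.eleven_le
    have h3 := (PySem.List.mem_pyRange_one.mp hn).2
    omega
  · have hperm : (find_repeated_digit_sequences start end_).Perm
        (find_repeated_digit_sequences_alt start end_) := by
      rw [List.perm_ext_iff_of_nodup
        ((pairwise_A start end_).imp ne_of_lt) ((pairwise_B start end_).imp ne_of_lt)]
      intro n
      rw [mem_A_iff, mem_B_iff start end_ n h11]
    exact hperm.eq_of_pairwise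
      (fun a b _ _ hab hba => absurd hba (not_lt_of_gt hab))
      (pairwise_A start end_) (pairwise_B start end_)
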